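-- pv_equiv track=rewrite | github.com/JJongAchii/Strategy | core/analytics/optimizer.py | add_assets
-- ===== SOURCE A (Python) =====
-- def add_assets(clusters, num, num_assets):
--     if num < num_assets:
--         return [int(num)]
--     row = clusters[int(num - num_assets)]
--     left = add_assets(clusters, row[0], num_assets)
--     right = add_assets(clusters, row[1], num_assets)
--     if not isinstance(left, list):
--         left = [int(left)]
--     if isinstance(right, list):
--         left.extend(right)
--     else:
--         left.append(int(right))
--     return left
-- ===== SOURCE B (Python) =====
-- def add_assets(clusters, num, num_assets):
--     # Rewriting approach: keep a work list of nodes and repeatedly expand the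
--     # leftmost internal node in place until only leaves remain.
--     nodes = [num]
--     while True:
--         for i, n in enumerate(nodes):
--             if n >= num_assets:
--                 row = clusters[int(n - num_assets)]
--                 nodes[i:i + 1] = [row[0], row[1]]
--                 break
--         else:
--             return [int(n) for n in nodes]
-- ===== Notes on version B (the rewrite author's own statement) =====
-- stated objective: alternative
-- what changed: Replaces the recursive tree traversal (with its isinstance/extend result merging) by in-place leftmost-node rewriting: a single work list whose first internal node is repeatedly expanded until only leaves remain; Pre_ excludes only inputs on which A raises (IndexError on an out-of-range cluster row, RecursionError on a cyclic linkage).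
import Mathlib
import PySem

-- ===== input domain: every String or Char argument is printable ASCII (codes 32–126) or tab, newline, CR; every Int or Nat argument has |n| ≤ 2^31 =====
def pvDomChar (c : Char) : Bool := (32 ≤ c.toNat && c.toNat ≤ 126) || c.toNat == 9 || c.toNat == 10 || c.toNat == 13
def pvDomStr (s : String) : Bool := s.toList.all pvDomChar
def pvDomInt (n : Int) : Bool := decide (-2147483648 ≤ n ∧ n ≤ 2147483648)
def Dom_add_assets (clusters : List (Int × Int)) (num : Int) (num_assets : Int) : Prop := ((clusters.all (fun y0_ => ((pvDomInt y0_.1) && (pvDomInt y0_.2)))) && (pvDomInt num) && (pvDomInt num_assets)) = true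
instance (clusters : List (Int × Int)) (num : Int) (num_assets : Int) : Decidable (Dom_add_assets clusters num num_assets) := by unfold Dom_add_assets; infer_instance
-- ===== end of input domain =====

-- B replaces A's recursive tree traversal by leftmost-node rewriting: a work list whose first
-- internal node is repeatedly expanded in place until only leaves remain (alternative decomposition, same cost).


-- ===== PORT A =====
-- A's recursion: leaf if num < num_assets, else recurse on both children of clusters[num - num_assets].
-- The fuel argument only makes the recursion total (Python has no fuel); under Pre_ it never runs out.
-- A's dead isinstance branches (results are always lists) vanish: left.extend(right) = append.
def goA (clusters : List (Int × Int)) (num_assets : Int) : Nat → Int → List Int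
  | 0, _ => []
  | f + 1, n =>
    if n < num_assets then [n]
    else
      match PySem.List.pyGet? clusters (n - num_assets) with
      | none => []   -- Python raises IndexError here; Pre_ excludes it
      | some row => goA clusters num_assets f row.1 ++ goA clusters num_assets f row.2

def add_assets (clusters : List (Int × Int)) (num : Int) (num_assets : Int) : List Int :=
  goA clusters num_assets (clusters.length + 1) num

-- ===== PORT B =====
-- Source B's inner for-loop: scan the work list for its first internal node and splice that node's
-- two children in its place; none = the for-loop fell through (every node is a leaf).
def expandB (clusters : List (Int × Int)) (num_assets : Int) : List Int → Option (List Int)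
  | [] => none
  | n :: rest =>
    if num_assets ≤ n then
      match PySem.List.pyGet? clusters (n - num_assets) with
      | some row => some (row.1 :: row.2 :: rest)
      | none => none   -- Python raises IndexError here; Pre_ excludes it
    else (expandB clusters num_assets rest).map (fun t => n :: t)

-- Source B's 'while True' loop; fuel is a totality guard only (under Pre_ it never runs out).
-- The final '[int(n) for n in nodes]' is the identity on a list of Ints.
def goB (clusters : List (Int × Int)) (num_assets : Int) : Nat → List Int → List Int
  | 0, xs => xs
  | f + 1, xs =>
    match expandB clusters num_assets xs with
    | none => xs
    | some ys => goB clusters num_assets f ys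

def add_assets_alt (clusters : List (Int × Int)) (num : Int) (num_assets : Int) : List Int :=
  goB clusters num_assets (2 ^ (clusters.length + 1)) [num]

-- ===== PRECONDITION & SPEC =====
-- Helpers for Pre_: the bounded least fixpoint of "row all of whose child links are leaves or
-- already-safe rows" — a well-foundedness condition on the linkage graph, not the port's traversal.
def childOK (clusters : List (Int × Int)) (num_assets : Int) (S : List Nat) (c : Int) : Bool :=
  decide (c < num_assets) ||
    (decide (0 ≤ c - num_assets) && decide (c - num_assets < (clusters.length : Int)) &&
      S.contains (c - num_assets).toNat)

def safeStep (clusters : List (Int × Int)) (num_assets : Int) (S : List Nat) : List Nat :=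
  (List.range clusters.length).filter (fun i =>
    match clusters[i]? with
    | some row => childOK clusters num_assets S row.1 && childOK clusters num_assets S row.2
    | none => false)

def safeSet (clusters : List (Int × Int)) (num_assets : Int) : Nat → List Nat
  | 0 => []
  | k + 1 => safeStep clusters num_assets (safeSet clusters num_assets k)

-- Pre_ holds exactly when A returns: num is a leaf, or its row is in range and in the least
-- fixpoint above (every child link reachable from num stays in range and is acyclic); outside
-- Pre_, A raises IndexError or RecursionError, so no value of A is excluded by Pre_.
def Pre_add_assets (clusters : List (Int × Int)) (num : Int) (num_assets : Int) : Prop :=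
  num < num_assets ∨
    (num_assets ≤ num ∧ num - num_assets < (clusters.length : Int) ∧
      (num - num_assets).toNat ∈ safeSet clusters num_assets clusters.length)
instance (clusters : List (Int × Int)) (num : Int) (num_assets : Int) : Decidable (Pre_add_assets clusters num num_assets) := by unfold Pre_add_assets; infer_instance

def pvWitness_add_assets : (List (Int × Int)) × Int × Int := ([(0, 1), (2, 3)], 4, 3)

def Spec_add_assets (clusters : List (Int × Int)) (num : Int) (num_assets : Int) (out : List Int) : Prop := out = add_assets_alt clusters num num_assets
instance (clusters : List (Int × Int)) (num : Int) (num_assets : Int) (out : List Int) : Decidable (Spec_add_assets clusters num num_assets out) := by unfold Spec_add_assets; infer_instance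

-- ===== CLAIM (what is proved, stated in full; the proofs are below) =====
def Claim_equal_add_assets : Prop := ∀ (clusters : List (Int × Int)) (num : Int) (num_assets : Int), Dom_add_assets clusters num num_assets → Pre_add_assets clusters num num_assets → Spec_add_assets clusters num num_assets (add_assets clusters num num_assets)

-- ===== LEMMAS AND PROOFS =====

-- "n is a leaf, or an in-range row that is safe after k fixpoint rounds"
def SafeK (clusters : List (Int × Int)) (num_assets : Int) (k : Nat) (n : Int) : Prop :=
  n < num_assets ∨
    (num_assets ≤ n ∧ n - num_assets < (clusters.length : Int) ∧
      (n - num_assets).toNat ∈ safeSet clusters num_assets k)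

-- node-visit count of A's recursion, used to bound B's number of rewriting steps
def costA (clusters : List (Int × Int)) (num_assets : Int) : Nat → Int → Nat
  | 0, _ => 0
  | f + 1, n =>
    if n < num_assets then 1
    else
      match PySem.List.pyGet? clusters (n - num_assets) with
      | none => 0
      | some row => 1 + costA clusters num_assets f row.1 + costA clusters num_assets f row.2

lemma childOK_mono {clusters : List (Int × Int)} {num_assets : Int} {S T : List Nat} {c : Int}
    (hST : ∀ j, j ∈ S → j ∈ T) (h : childOK clusters num_assets S c = true) :
    childOK clusters num_assets T c = true := by
  simp only [childOK, Bool.or_eq_true, Bool.and_eq_true, decide_eq_true_eq,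
    List.contains_eq_mem] at h ⊢
  rcases h with h | ⟨⟨h1, h2⟩, h3⟩
  · exact Or.inl h
  · exact Or.inr ⟨⟨h1, h2⟩, hST _ h3⟩

lemma safeSet_mono {clusters : List (Int × Int)} {num_assets : Int} :
    ∀ k i, i ∈ safeSet clusters num_assets k → i ∈ safeSet clusters num_assets (k + 1) := by
  intro k
  induction k with
  | zero => intro i h; simp [safeSet] at h
  | succ k ih =>
    intro i h
    simp only [safeSet, safeStep, List.mem_filter] at h ⊢
    refine ⟨h.1, ?_⟩
    have h2 := h.2
    match hrow : clusters[i]? with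
    | none => simp [hrow] at h2
    | some row =>
      simp only [hrow, Bool.and_eq_true] at h2 ⊢
      exact ⟨childOK_mono ih h2.1, childOK_mono ih h2.2⟩

lemma SafeK_succ {clusters : List (Int × Int)} {num_assets : Int} {k : Nat} {n : Int}
    (h : SafeK clusters num_assets k n) : SafeK clusters num_assets (k + 1) n := by
  rcases h with h | ⟨h1, h2, h3⟩
  · exact Or.inl h
  · exact Or.inr ⟨h1, h2, safeSet_mono k _ h3⟩

lemma safe_child {clusters : List (Int × Int)} {num_assets : Int} {k : Nat} {n : Int}
    (h : SafeK clusters num_assets (k + 1) n) (hn : ¬ n < num_assets) :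
    ∃ row, PySem.List.pyGet? clusters (n - num_assets) = some row ∧
      SafeK clusters num_assets k row.1 ∧ SafeK clusters num_assets k row.2 := by
  rcases h with h | ⟨h1, h2, h3⟩
  · exact absurd h hn
  have h0 : (0 : Int) ≤ n - num_assets := by omega
  have hlen : (n - num_assets).toNat < clusters.length := by omega
  have hget : PySem.List.pyGet? clusters (n - num_assets) = some clusters[(n - num_assets).toNat] :=
    PySem.List.pyGet?_eq_some_getElem clusters h0 h2
  refine ⟨clusters[(n - num_assets).toNat], hget, ?_⟩
  simp only [safeSet, safeStep, List.mem_filter] at h3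
  have h4 := h3.2
  rw [List.getElem?_eq_getElem hlen] at h4
  simp only [Bool.and_eq_true] at h4
  have hchild : ∀ c : Int, childOK clusters num_assets (safeSet clusters num_assets k) c = true →
      SafeK clusters num_assets k c := by
    intro c hc
    simp only [childOK, Bool.or_eq_true, Bool.and_eq_true, decide_eq_true_eq,
      List.contains_eq_mem] at hc
    rcases hc with hc | ⟨⟨hc1, hc2⟩, hc3⟩
    · exact Or.inl hc
    · exact Or.inr ⟨by omega, hc2, hc3⟩
  exact ⟨hchild _ h4.1, hchild _ h4.2⟩

-- under SafeK k, goA's value is independent of any fuel above k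
lemma goA_fuel {clusters : List (Int × Int)} {num_assets : Int} :
    ∀ k n f g, SafeK clusters num_assets k n → k < f → k < g →
      goA clusters num_assets f n = goA clusters num_assets g n := by
  intro k
  induction k with
  | zero =>
    intro n f g hk hf hg
    obtain ⟨f, rfl⟩ := Nat.exists_eq_succ_of_ne_zero (by omega : f ≠ 0)
    obtain ⟨g, rfl⟩ := Nat.exists_eq_succ_of_ne_zero (by omega : g ≠ 0)
    have hn : n < num_assets := by
      rcases hk with h | ⟨_, _, h3⟩
      · exact h
      · simp [safeSet] at h3
    simp [goA, hn]
  | succ k ih =>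
    intro n f g hk hf hg
    obtain ⟨f, rfl⟩ := Nat.exists_eq_succ_of_ne_zero (by omega : f ≠ 0)
    obtain ⟨g, rfl⟩ := Nat.exists_eq_succ_of_ne_zero (by omega : g ≠ 0)
    by_cases hn : n < num_assets
    · simp [goA, hn]
    · obtain ⟨row, hrow, hs1, hs2⟩ := safe_child hk hn
      simp only [goA, if_neg hn, hrow]
      rw [ih row.1 f g hs1 (by omega) (by omega), ih row.2 f g hs2 (by omega) (by omega)]

-- costA likewise
lemma costA_fuel {clusters : List (Int × Int)} {num_assets : Int} :
    ∀ k n f g, SafeK clusters num_assets k n → k < f → k < g →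
      costA clusters num_assets f n = costA clusters num_assets g n := by
  intro k
  induction k with
  | zero =>
    intro n f g hk hf hg
    obtain ⟨f, rfl⟩ := Nat.exists_eq_succ_of_ne_zero (by omega : f ≠ 0)
    obtain ⟨g, rfl⟩ := Nat.exists_eq_succ_of_ne_zero (by omega : g ≠ 0)
    have hn : n < num_assets := by
      rcases hk with h | ⟨_, _, h3⟩
      · exact h
      · simp [safeSet] at h3
    simp [costA, hn]
  | succ k ih =>
    intro n f g hk hf hg
    obtain ⟨f, rfl⟩ := Nat.exists_eq_succ_of_ne_zero (by omega : f ≠ 0)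
    obtain ⟨g, rfl⟩ := Nat.exists_eq_succ_of_ne_zero (by omega : g ≠ 0)
    by_cases hn : n < num_assets
    · simp [costA, hn]
    · obtain ⟨row, hrow, hs1, hs2⟩ := safe_child hk hn
      simp only [costA, if_neg hn, hrow]
      rw [ih row.1 f g hs1 (by omega) (by omega), ih row.2 f g hs2 (by omega) (by omega)]

lemma costA_pos {clusters : List (Int × Int)} {num_assets : Int} {k : Nat} {n : Int} {f : Nat}
    (hk : SafeK clusters num_assets k n) (hf : k < f) :
    1 ≤ costA clusters num_assets f n := by
  obtain ⟨f, rfl⟩ := Nat.exists_eq_succ_of_ne_zero (by omega : f ≠ 0)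
  by_cases hn : n < num_assets
  · simp [costA, hn]
  · have hk' : SafeK clusters num_assets k n := hk
    match k, hk' with
    | 0, hk' =>
      exfalso
      rcases hk' with h | ⟨_, _, h3⟩
      · exact hn h
      · simp [safeSet] at h3
    | k + 1, hk' =>
      obtain ⟨row, hrow, _⟩ := safe_child hk' hn
      simp only [costA, if_neg hn, hrow]
      omega

lemma costA_le_pow (clusters : List (Int × Int)) (num_assets : Int) :
    ∀ f n, costA clusters num_assets f n ≤ 2 ^ f - 1 := by
  intro f
  induction f with
  | zero => intro n; simp [costA]
  | succ f ih =>
    intro n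
    by_cases hn : n < num_assets
    · simp only [costA, if_pos hn]
      have : 1 ≤ 2 ^ (f + 1) := Nat.one_le_two_pow
      omega
    · simp only [costA, if_neg hn]
      match hrow : PySem.List.pyGet? clusters (n - num_assets) with
      | none => simp
      | some row =>
        have h1 := ih row.1
        have h2 := ih row.2
        have : 1 ≤ 2 ^ f := Nat.one_le_two_pow
        simp only [pow_succ]
        omega

-- one rewriting step: on a list of safe nodes, expandB either reports a normal form (all leaves,
-- where flatMap goA is the identity) or splices one node, keeping safety and the flattened value
-- while decreasing the total cost by exactly one
lemma expandB_spec {clusters : List (Int × Int)} {num_assets : Int} :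
    ∀ xs : List Int, (∀ n ∈ xs, SafeK clusters num_assets clusters.length n) →
      (expandB clusters num_assets xs = none ∧
        xs.flatMap (goA clusters num_assets (clusters.length + 1)) = xs) ∨
      (∃ ys, expandB clusters num_assets xs = some ys ∧
        (∀ n ∈ ys, SafeK clusters num_assets clusters.length n) ∧
        (ys.map (costA clusters num_assets (clusters.length + 1))).sum + 1 =
          (xs.map (costA clusters num_assets (clusters.length + 1))).sum ∧
        ys.flatMap (goA clusters num_assets (clusters.length + 1)) =
          xs.flatMap (goA clusters num_assets (clusters.length + 1))) := by
  intro xs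
  induction xs with
  | nil => intro _; exact Or.inl ⟨rfl, rfl⟩
  | cons n rest ih =>
    intro hsafe
    have hn := hsafe n (by simp)
    by_cases hge : num_assets ≤ n
    · -- internal node: clusters.length must be a successor (safeSet 0 is empty)
      have hL : clusters.length ≠ 0 := by
        rcases hn with h | ⟨_, h2, _⟩
        · omega
        · intro h0; rw [h0] at h2; omega
      obtain ⟨L, hLe⟩ := Nat.exists_eq_succ_of_ne_zero hL
      rw [hLe] at hn
      obtain ⟨row, hrow, hs1, hs2⟩ := safe_child hn (by omega)
      refine Or.inr ⟨row.1 :: row.2 :: rest, ?_, ?_, ?_, ?_⟩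
      · simp only [expandB, if_pos hge, hrow]
      · intro m hm
        simp only [List.mem_cons] at hm
        rcases hm with h | h | h
        · rw [h, hLe]; exact SafeK_succ hs1
        · rw [h, hLe]; exact SafeK_succ hs2
        · exact hsafe m (by simp [h])
      · have hc : costA clusters num_assets (clusters.length + 1) n =
            1 + costA clusters num_assets clusters.length row.1
              + costA clusters num_assets clusters.length row.2 := by
          conv_lhs => simp only [costA, if_neg (by omega : ¬ n < num_assets), hrow]
        have hc1 : costA clusters num_assets clusters.length row.1 =
            costA clusters num_assets (clusters.length + 1) row.1 :=
          costA_fuel L row.1 _ _ hs1 (by omega) (by omega)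
        have hc2 : costA clusters num_assets clusters.length row.2 =
            costA clusters num_assets (clusters.length + 1) row.2 :=
          costA_fuel L row.2 _ _ hs2 (by omega) (by omega)
        simp only [List.map_cons, List.sum_cons]
        rw [hc, hc1, hc2]; omega
      · have hg : goA clusters num_assets (clusters.length + 1) n =
            goA clusters num_assets (clusters.length + 1) row.1 ++
            goA clusters num_assets (clusters.length + 1) row.2 := by
          conv_lhs => simp only [goA, if_neg (by omega : ¬ n < num_assets), hrow]
          rw [goA_fuel L row.1 clusters.length (clusters.length + 1) hs1 (by omega) (by omega),
            goA_fuel L row.2 clusters.length (clusters.length + 1) hs2 (by omega) (by omega)]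
        simp [List.flatMap_cons, hg]
    · -- leaf: keep it and recurse on the rest
      have hleaf : goA clusters num_assets (clusters.length + 1) n = [n] := by
        simp [goA, show n < num_assets by omega]
      rcases ih (fun m hm => hsafe m (by simp [hm])) with ⟨hnone, hflat⟩ | ⟨ys, hsome, hs, hc, hflat⟩
      · refine Or.inl ⟨?_, ?_⟩
        · simp only [expandB, if_neg hge, hnone, Option.map_none]
        · simp [List.flatMap_cons, hleaf, hflat]
      · refine Or.inr ⟨n :: ys, ?_, ?_, ?_, ?_⟩
        · simp only [expandB, if_neg hge, hsome, Option.map_some]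
        · intro m hm
          simp only [List.mem_cons] at hm
          rcases hm with h | h
          · rw [h]; exact hn
          · exact hs m h
        · simp only [List.map_cons, List.sum_cons]; omega
        · simp [List.flatMap_cons, hleaf, hflat]

-- the rewriting loop flattens a safe work list, given fuel at least its total cost
lemma goB_eq {clusters : List (Int × Int)} {num_assets : Int} :
    ∀ F xs, (∀ n ∈ xs, SafeK clusters num_assets clusters.length n) →
      (xs.map (costA clusters num_assets (clusters.length + 1))).sum ≤ F →
      goB clusters num_assets F xs =
        xs.flatMap (goA clusters num_assets (clusters.length + 1)) := by
  intro F
  induction F with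
  | zero =>
    intro xs hsafe hsum
    match xs with
    | [] => simp [goB]
    | n :: rest =>
      exfalso
      have := costA_pos (f := clusters.length + 1) (hsafe n (by simp)) (by omega)
      simp only [List.map_cons, List.sum_cons] at hsum
      omega
  | succ F ih =>
    intro xs hsafe hsum
    rcases expandB_spec xs hsafe with ⟨hnone, hflat⟩ | ⟨ys, hsome, hs, hc, hflat⟩
    · simp [goB, hnone, hflat]
    · simp only [goB, hsome]
      rw [ih ys hs (by omega), hflat]

-- ===== VERDICT (by name: the statement is the Claim_ definition above) =====
theorem add_assets_spec : Claim_equal_add_assets := by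
  intro clusters num num_assets _ hPre
  unfold Spec_add_assets add_assets add_assets_alt
  have hsafe : SafeK clusters num_assets clusters.length num := hPre
  have hcost : ([num].map (costA clusters num_assets (clusters.length + 1))).sum ≤
      2 ^ (clusters.length + 1) := by
    have h1 := costA_le_pow clusters num_assets (clusters.length + 1) num
    have h2 : 1 ≤ 2 ^ (clusters.length + 1) := Nat.one_le_two_pow
    simp only [List.map_cons, List.map_nil, List.sum_cons, List.sum_nil]
    omega
  rw [goB_eq (2 ^ (clusters.length + 1)) [num] (by intro m hm; simp at hm; exact hm ▸ hsafe) hcost]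
  simp [List.flatMap_cons]
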